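-- pv_equiv track=rewrite | github.com/lengfeld/subpatch | src/config.py | split_with_ts
-- ===== SOURCE A (Python) =====
-- def split_with_ts(s):
--     len_s = len(s)
--     pos = 0
--     while pos < len_s:
--         new_pos = s.find("\n", pos)
--         if new_pos == -1:
--             # newline character not found anymore
--             new_pos = len_s - 1
--         yield s[pos:new_pos + 1]
--         pos = new_pos + 1
-- ===== SOURCE B (Python) =====
-- def split_with_ts(s):
--     parts = s.split("\n")
--     for part in parts[:-1]:
--         yield part + "\n"
--     if parts[-1]:
--         yield parts[-1]
-- ===== Notes on version B (the rewrite author's own statement) =====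
-- stated objective: simpler
-- what changed: Replaces A's index-based find/slice scanning loop with a split-on-newline pass that reattaches the terminator to each part and drops the empty final part.
import Mathlib
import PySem

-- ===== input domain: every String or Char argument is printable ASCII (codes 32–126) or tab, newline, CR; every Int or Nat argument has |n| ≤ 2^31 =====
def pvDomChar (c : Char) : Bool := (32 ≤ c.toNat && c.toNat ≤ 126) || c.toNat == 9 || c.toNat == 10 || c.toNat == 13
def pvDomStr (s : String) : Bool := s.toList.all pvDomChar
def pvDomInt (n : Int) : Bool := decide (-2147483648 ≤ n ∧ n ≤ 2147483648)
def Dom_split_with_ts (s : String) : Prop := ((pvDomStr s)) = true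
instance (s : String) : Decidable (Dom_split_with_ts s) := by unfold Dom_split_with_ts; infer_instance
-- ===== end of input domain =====

-- B replaces A's find/slice scanning loop by split-on-newline with the terminator reattached; objective: simpler.


-- ===== PORT A =====
-- while pos < len_s, ported as fuel recursion (each iteration advances pos by at least 1,
-- so fuel = len_s suffices; the fuel-0 branch is unreachable)
def splitWithTsLoop (s : String) (len_s : Int) (pos : Int) (fuel : Nat) : List String :=
  match fuel with
  | 0 => []
  | fuel + 1 =>
    if pos < len_s then
      let new_pos := PySem.Str.findFrom s "\n" pos
      let new_pos := if new_pos = -1 then len_s - 1 else new_pos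
      PySem.Str.slice s (some pos) (some (new_pos + 1)) ::
        splitWithTsLoop s len_s (new_pos + 1) fuel
    else []

def split_with_ts (s : String) : List String :=
  splitWithTsLoop s (PySem.Str.len s) 0 (PySem.Str.len s).toNat

-- ===== PORT B =====
def split_with_ts_alt (s : String) : List String :=
  let parts := (PySem.Str.split? s "\n").getD [s]   -- sep "\n" ≠ "": split? never none (getD is a totality guard)
  let res := (PySem.List.slice parts none (some (-1))).map (fun p => p ++ "\n")
  match PySem.List.pyGet? parts (-1) with           -- parts is never empty: pyGet? never none
  | some last => if last ≠ "" then res ++ [last] else res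
  | none => res

-- ===== PRECONDITION & SPEC =====
def Spec_split_with_ts (s : String) (out : List String) : Prop := out = split_with_ts_alt s
instance (s : String) (out : List String) : Decidable (Spec_split_with_ts s out) := by unfold Spec_split_with_ts; infer_instance

-- ===== CLAIM (what is proved, stated in full; the proofs are below) =====
def Claim_equal_split_with_ts : Prop := ∀ (s : String), Dom_split_with_ts s → Spec_split_with_ts s (split_with_ts s)

-- ===== LEMMAS AND PROOFS =====

-- reference split on '\n' over List Char (proof-side only)
def msplit : List Char → List (List Char)
  | [] => [[]]
  | c :: rest => if c = '\n' then [] :: msplit rest else (msplit rest).modifyHead (c :: ·)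

-- reference "reattach terminators" step (proof-side only)
def conv (parts : List (List Char)) : List (List Char) :=
  parts.dropLast.map (· ++ ['\n']) ++
    (match parts.getLast? with
     | some l => if l = [] then [] else [l]
     | none => [])

lemma msplit_ne_nil (l : List Char) : msplit l ≠ [] := by
  induction l with
  | nil => simp [msplit]
  | cons c rest ih =>
    simp only [msplit]
    split_ifs
    · simp
    · cases h : msplit rest with
      | nil => exact absurd h ih
      | cons a t => simp

lemma splitOn_go_eq (fuel : Nat) (l cur : List Char) (acc : List (List Char))
    (h : l.length < fuel) :
    PySem.Chars.splitOn.go ['\n'] fuel l cur acc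
      = acc.reverse ++ (msplit l).modifyHead (cur.reverse ++ ·) := by
  induction fuel generalizing l cur acc with
  | zero => omega
  | succ fuel ih =>
    cases l with
    | nil => simp [PySem.Chars.splitOn.go, msplit]
    | cons c rest =>
      by_cases hc : c = '\n'
      · subst hc
        rw [show PySem.Chars.splitOn.go ['\n'] (fuel + 1) ('\n' :: rest) cur acc
              = PySem.Chars.splitOn.go ['\n'] fuel rest [] (cur.reverse :: acc) from by
            simp [PySem.Chars.splitOn.go]]
        rw [ih rest [] (cur.reverse :: acc) (by simpa using Nat.lt_of_succ_lt_succ h)]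
        cases hm : msplit rest with
        | nil => exact absurd hm (msplit_ne_nil rest)
        | cons a t => simp [msplit, hm]
      · rw [show PySem.Chars.splitOn.go ['\n'] (fuel + 1) (c :: rest) cur acc
              = PySem.Chars.splitOn.go ['\n'] fuel rest (c :: cur) acc from by
            have hpre : List.isPrefixOf ['\n'] (c :: rest) = false := by
              simp [List.isPrefixOf, Ne.symm hc]
            simp [PySem.Chars.splitOn.go, hpre]]
        rw [ih rest (c :: cur) acc (by simpa using Nat.lt_of_succ_lt_succ h)]
        simp only [msplit, if_neg hc]
        cases hm : msplit rest with
        | nil => exact absurd hm (msplit_ne_nil rest)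
        | cons a t => simp

lemma splitOn_eq_msplit (cs : List Char) : PySem.Chars.splitOn cs ['\n'] = msplit cs := by
  rw [PySem.Chars.splitOn, splitOn_go_eq _ _ _ _ (by omega)]
  cases hm : msplit cs with
  | nil => exact absurd hm (msplit_ne_nil cs)
  | cons a t => simp

lemma msplit_no_nl (t : List Char) (h : '\n' ∉ t) : msplit t = [t] := by
  induction t with
  | nil => rfl
  | cons c rest ih =>
    simp only [List.mem_cons, not_or] at h
    simp [msplit, Ne.symm h.1, ih h.2]

lemma msplit_append (a b : List Char) (h : '\n' ∉ a) :
    msplit (a ++ '\n' :: b) = a :: msplit b := by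
  induction a with
  | nil => simp [msplit]
  | cons c rest ih =>
    simp only [List.mem_cons, not_or] at h
    simp [msplit, Ne.symm h.1, ih h.2]

lemma conv_cons (a : List Char) (rest : List (List Char)) (h : rest ≠ []) :
    conv (a :: rest) = (a ++ ['\n']) :: conv rest := by
  obtain ⟨r, rs, rfl⟩ := List.exists_cons_of_ne_nil h
  simp [conv]

lemma map_toList_inj (xs ys : List String) (h : xs.map String.toList = ys.map String.toList) :
    xs = ys := by
  exact List.map_injective_iff.mpr (fun a b hab => String.toList_inj.mp hab) h

lemma singleton_prefix_drop {c : Char} {t : List Char} {i : Nat} (hi : i < t.length) :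
    ([c] <+: t.drop i) ↔ t[i] = c := by
  rw [List.drop_eq_getElem_cons hi]
  constructor
  · rintro ⟨tl, htl⟩
    have h' : t[i]? = some c := by simpa using congrArg List.head? htl.symm
    rwa [List.getElem?_eq_getElem hi, Option.some.injEq] at h'
  · intro h
    exact ⟨t.drop (i+1), by rw [h]; rfl⟩

lemma loopA_eq (s : String) (fuel pos : Nat) (h1 : pos ≤ s.toList.length)
    (h2 : s.toList.length - pos ≤ fuel) :
    (splitWithTsLoop s (s.toList.length : Int) (pos : Int) fuel).map String.toList
      = conv (msplit (s.toList.drop pos)) := by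
  induction fuel generalizing pos with
  | zero =>
    have hpl : pos = s.toList.length := by omega
    subst hpl
    have hd : s.toList.drop s.toList.length = [] := List.drop_length
    rw [hd]
    simp [splitWithTsLoop, msplit, conv]
  | succ fuel ih =>
    by_cases hpos : pos < s.toList.length
    · have hcond : (pos : Int) < (s.toList.length : Int) := by exact_mod_cast hpos
      rw [splitWithTsLoop, if_pos hcond]
      set t := s.toList.drop pos with ht
      have htlen : t.length = s.toList.length - pos := by simp [ht]
      have hfindFrom : PySem.Str.findFrom s "\n" (pos : Int)
          = if PySem.Chars.find t ['\n'] = -1 then -1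
            else (pos : Int) + PySem.Chars.find t ['\n'] := by
        rw [PySem.Str.findFrom_eq]
        have := PySem.Chars.findFrom_natCast s.toList "\n".toList pos (le_of_lt hpos)
        simpa [ht] using this
      by_cases hk : PySem.Chars.find t ['\n'] = -1
      · -- no newline from pos onwards: the loop yields the rest and stops
        have hnonl : '\n' ∉ t := by
          have hninf := PySem.Chars.find_eq_neg_one_iff t ['\n'] |>.mp hk
          intro hmem
          exact hninf ((List.singleton_infix_iff _ _).mpr hmem)
        rw [hfindFrom]
        simp only [hk, reduceIte]
        have harith : ((s.toList.length : Int) - 1) + 1 = ((s.toList.length : Nat) : Int) := by ring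
        rw [harith]
        simp only [List.map_cons]
        rw [ih s.toList.length (le_refl _) (by simp)]
        have hslice : (PySem.Str.slice s (some (pos : Int)) (some ((s.toList.length : Nat) : Int))).toList = t := by
          rw [PySem.Str.toList_slice, PySem.Chars.slice_eq_listSlice, PySem.List.slice_toNat (ha := by positivity) (hb := by positivity)]
          simp only [Int.toNat_natCast, ht]
          rw [List.take_of_length_le (by simp)]
        have hd : s.toList.drop s.toList.length = [] := List.drop_length
        rw [hd]
        simp only [hslice]
        rw [msplit_no_nl t hnonl]
        have htne : t ≠ [] := by
          intro hc; rw [hc] at htlen; simp only [List.length_nil] at htlen; omega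
        simp [conv, msplit, htne]
      · -- first newline of t at index j: yield t.take (j+1), continue after it
        have hk0 : 0 ≤ PySem.Chars.find t ['\n'] := by
          have := PySem.Chars.neg_one_le_find t ['\n']
          omega
        set j := (PySem.Chars.find t ['\n']).toNat with hj
        have hkj : PySem.Chars.find t ['\n'] = (j : Int) := (Int.toNat_of_nonneg hk0).symm
        obtain ⟨hpre, hmin⟩ := PySem.Chars.find_spec hk0
        have hjlt : j < t.length := by
          by_contra hge
          rw [List.drop_of_length_le (by omega)] at hpre
          obtain ⟨tl, htl⟩ := hpre
          simp at htl
        have htj : t[j] = '\n' := (singleton_prefix_drop hjlt).mp hpre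
        set a := t.take j with ha
        set b := t.drop (j + 1) with hb
        have halen : a.length = j := by rw [ha, List.length_take]; omega
        have hanl : '\n' ∉ a := by
          intro hmem
          obtain ⟨i, hi, hti⟩ := List.getElem_of_mem hmem
          have hij : i < j := by rw [halen] at hi; exact hi
          have : t[i]'(by omega) = '\n' := by
            rwa [List.getElem_take] at hti
          exact hmin i hij ((singleton_prefix_drop (by omega)).mpr this)
        have hta : t = a ++ '\n' :: b := by
          conv_lhs => rw [← List.take_append_drop j t]
          rw [List.drop_eq_getElem_cons hjlt, htj]
        have hne2 : ¬ ((pos : Int) + PySem.Chars.find t ['\n'] = -1) := by omega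
        simp only [hfindFrom, if_neg hk, if_neg hne2]
        have hposcast : (pos : Int) + PySem.Chars.find t ['\n'] + 1 = ((pos + j + 1 : Nat) : Int) := by
          rw [hkj]; push_cast; ring
        rw [hposcast]
        have hslice : (PySem.Str.slice s (some (pos : Int)) (some ((pos + j + 1 : Nat) : Int))).toList
            = a ++ ['\n'] := by
          rw [PySem.Str.toList_slice, PySem.Chars.slice_eq_listSlice, PySem.List.slice_toNat (ha := by positivity) (hb := by positivity)]
          simp only [Int.toNat_natCast, ← ht]
          have : (pos + j + 1) - pos = j + 1 := by omega
          rw [this, hta]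
          rw [show j + 1 = a.length + 1 from by omega, List.take_append]
          simp
        have hdrop : s.toList.drop (pos + j + 1) = b := by
          rw [hb, ht, List.drop_drop, Nat.add_assoc]
        simp only [List.map_cons]
        rw [ih (pos + j + 1) (by omega) (by omega), hdrop]
        rw [hslice, hta, msplit_append a b hanl, conv_cons a _ (msplit_ne_nil b)]
    · have hpl : pos = s.toList.length := by omega
      subst hpl
      have hcond : ¬ ((s.toList.length : Nat) : Int) < (s.toList.length : Int) := by omega
      have hd : s.toList.drop s.toList.length = [] := List.drop_length
      rw [hd]
      simp [splitWithTsLoop, msplit, conv]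

lemma pyGet?_neg_one {α : Type} (l : List α) (h : l ≠ []) :
    PySem.List.pyGet? l (-1) = l.getLast? := by
  have hl : 0 < l.length := List.length_pos_iff.mpr h
  simp only [PySem.List.pyGet?, PySem.List.pyIdx?]
  rw [List.getLast?_eq_getElem?]
  split_ifs with h1 h2 <;> first | rfl | omega

lemma altB_eq (s : String) :
    (split_with_ts_alt s).map String.toList = conv (msplit s.toList) := by
  have h0 := PySem.Str.split?_map s "\n"
  have h1 : PySem.Chars.split? s.toList "\n".toList = some (msplit s.toList) := by
    simp [PySem.Chars.split?, splitOn_eq_msplit]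
  rw [h1] at h0
  cases hsp : PySem.Str.split? s "\n" with
  | none => rw [hsp] at h0; simp at h0
  | some ps =>
    rw [hsp] at h0
    simp only [Option.map_some, Option.some.injEq] at h0
    have hne : ps ≠ [] := by
      intro hnil
      exact msplit_ne_nil s.toList (by rw [← h0, hnil]; rfl)
    unfold split_with_ts_alt
    rw [hsp]
    simp only [Option.getD_some]
    rw [PySem.List.slice_to_neg_one, pyGet?_neg_one ps hne]
    obtain ⟨last, hlast⟩ := Option.ne_none_iff_exists'.mp (by
      simpa [List.getLast?_eq_none_iff] using hne : ps.getLast? ≠ none)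
    rw [hlast]
    rw [← h0]
    unfold conv
    rw [← List.map_dropLast, List.getLast?_map, hlast]
    simp only [Option.map_some]
    have hmap : List.map (String.toList ∘ fun p => p ++ "\n") ps
        = List.map ((fun x => x ++ ['\n']) ∘ String.toList) ps := by
      refine List.map_congr_left (fun p _ => ?_)
      simp [String.toList_append]
    by_cases hl : last = ""
    · subst hl
      simp [List.map_map, hmap]
    · have hl' : last.toList ≠ [] := by
        intro hc
        exact hl (String.toList_inj.mp (by simpa using hc))
      simp [hl, hl', List.map_map, hmap]

-- ===== VERDICT (by name: the statement is the Claim_ definition above) =====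
theorem split_with_ts_spec : Claim_equal_split_with_ts := by
  intro s _
  unfold Spec_split_with_ts
  apply map_toList_inj
  rw [altB_eq]
  have h := loopA_eq s s.toList.length 0 (by omega) (by omega)
  simpa [split_with_ts, PySem.Str.len_eq] using h
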